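-- pv_equiv track=rewrite | github.com/colinspiri/playtester_slots | search.py | get_frequency_of
-- ===== SOURCE A (Python) =====
-- def get_frequency_of(all_times, name):
-- 	frequency = {}
-- 	for time, slots in all_times.items():
-- 		for cohort_member, playtester in slots.items():
-- 			if playtester == "FREE":
-- 				continue
-- 			if cohort_member in frequency:
-- 				frequency[cohort_member] += 1
-- 			else:
-- 				frequency[cohort_member] = 1
-- 	if name not in frequency:
-- 		return 0
-- 	else:
-- 		return frequency[name]
-- ===== SOURCE B (Python) =====
-- def get_frequency_of(all_times, name):
-- 	return sum(1 for slots in all_times.values()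
-- 	           for cohort_member, playtester in slots.items()
-- 	           if cohort_member == name and playtester != "FREE")
-- ===== Notes on version B (the rewrite author's own statement) =====
-- stated objective: simpler
-- what changed: B drops the frequency dictionary entirely and directly sums matching non-FREE slot entries for the requested name in one filtered pass, instead of building a full per-member count table and then looking it up.
import Mathlib
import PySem

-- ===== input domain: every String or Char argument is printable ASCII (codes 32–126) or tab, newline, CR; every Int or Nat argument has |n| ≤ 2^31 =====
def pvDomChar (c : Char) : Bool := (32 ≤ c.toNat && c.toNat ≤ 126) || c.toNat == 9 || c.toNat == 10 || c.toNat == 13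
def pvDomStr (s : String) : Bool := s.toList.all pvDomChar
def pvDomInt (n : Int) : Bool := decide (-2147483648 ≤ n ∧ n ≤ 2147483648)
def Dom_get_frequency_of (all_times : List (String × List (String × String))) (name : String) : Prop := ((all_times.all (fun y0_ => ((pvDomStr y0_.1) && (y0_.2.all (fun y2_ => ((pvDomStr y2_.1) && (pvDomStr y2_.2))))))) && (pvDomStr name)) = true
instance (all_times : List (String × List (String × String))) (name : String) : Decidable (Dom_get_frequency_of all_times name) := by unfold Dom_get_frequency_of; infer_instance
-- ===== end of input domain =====

-- B drops A's frequency dictionary and directly sums matching non-FREE entries for `name` (simpler; same cost).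

-- ===== PORT A =====
-- builds a frequency table over all non-FREE slot entries, then looks `name` up
def get_frequency_of (all_times : List (String × List (String × String))) (name : String) : Int :=
  let frequency : PySem.Dict String Int :=
    all_times.foldl (fun freq time_slots =>
      time_slots.2.foldl (fun freq entry =>
        if entry.2 == "FREE" then freq
        else if freq.contains entry.1 then freq.insert entry.1 (freq.getD entry.1 0 + 1)
        else freq.insert entry.1 1) freq) PySem.Dict.empty
  if !(frequency.contains name) then 0 else frequency.getD name 0

-- ===== PORT B =====
-- one filtered pass: sum(1 for slots in all_times.values() for m, p in slots.items() if m == name and p != "FREE")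
def get_frequency_of_alt (all_times : List (String × List (String × String))) (name : String) : Int :=
  all_times.foldl (fun total time_slots =>
    time_slots.2.foldl (fun total entry =>
      if entry.1 == name && !(entry.2 == "FREE") then total + 1 else total) total) 0

-- ===== PRECONDITION & SPEC =====
def Spec_get_frequency_of (all_times : List (String × List (String × String))) (name : String) (out : Int) : Prop := out = get_frequency_of_alt all_times name
instance (all_times : List (String × List (String × String))) (name : String) (out : Int) : Decidable (Spec_get_frequency_of all_times name out) := by unfold Spec_get_frequency_of; infer_instance

-- ===== CLAIM (what is proved, stated in full; the proofs are below) =====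
def Claim_equal_get_frequency_of : Prop := ∀ (all_times : List (String × List (String × String))) (name : String), Dom_get_frequency_of all_times name → Spec_get_frequency_of all_times name (get_frequency_of all_times name)

-- ===== LEMMAS AND PROOFS =====

-- A's inner loop over one slot dict: the count stored at `name` grows by the number of matching entries
theorem pv_inner_getD (l : List (String × String)) (name : String) (d : PySem.Dict String Int) :
    (l.foldl (fun freq entry =>
        if entry.2 == "FREE" then freq
        else if freq.contains entry.1 then freq.insert entry.1 (freq.getD entry.1 0 + 1)
        else freq.insert entry.1 1) d).getD name 0
    = l.foldl (fun total entry =>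
        if entry.1 == name && !(entry.2 == "FREE") then total + 1 else total) (d.getD name 0) := by
  induction l generalizing d with
  | nil => rfl
  | cons e rest ih =>
    simp only [List.foldl_cons]
    rw [ih]
    congr 1
    by_cases hfree : e.2 == "FREE"
    · simp [hfree]
    · by_cases hc : d.contains e.1
      · by_cases hn : e.1 = name
        · subst hn; simp [hfree, hc]
        · simp [hfree, hc, PySem.Dict.getD_insert, hn, Ne.symm hn]
      · have hcf : d.contains e.1 = false := by simpa using hc
        have hd0 : d.getD e.1 0 = 0 := by
          simp [PySem.Dict.getD_of_not_contains, hcf]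
        by_cases hn : e.1 = name
        · subst hn; simp [hfree, hcf, hd0]
        · simp [hfree, hcf, PySem.Dict.getD_insert, hn, Ne.symm hn]

-- outer loop: A's table lookup equals B's running total
theorem pv_outer (all_times : List (String × List (String × String))) (name : String)
    (d : PySem.Dict String Int) :
    (all_times.foldl (fun freq time_slots =>
        time_slots.2.foldl (fun freq entry =>
          if entry.2 == "FREE" then freq
          else if freq.contains entry.1 then freq.insert entry.1 (freq.getD entry.1 0 + 1)
          else freq.insert entry.1 1) freq) d).getD name 0
    = all_times.foldl (fun total time_slots =>
        time_slots.2.foldl (fun total entry =>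
          if entry.1 == name && !(entry.2 == "FREE") then total + 1 else total) total)
        (d.getD name 0) := by
  induction all_times generalizing d with
  | nil => rfl
  | cons ts rest ih => simp only [List.foldl_cons]; rw [ih, pv_inner_getD]

-- ===== VERDICT (by name: the statement is the Claim_ definition above) =====
theorem get_frequency_of_spec : Claim_equal_get_frequency_of := by
  intro all_times name _
  unfold Spec_get_frequency_of get_frequency_of get_frequency_of_alt
  have h := pv_outer all_times name PySem.Dict.empty
  rw [PySem.Dict.getD_empty] at h
  dsimp only
  split_ifs with hc
  · rw [Bool.not_eq_true'] at hc
    rw [← h]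
    exact (PySem.Dict.getD_of_not_contains _ _ hc).symm
  · exact h
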